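-- pv_equiv track=rewrite | github.com/pypi-data/pypi-mirror-206 | packages/forbidden/forbidden-9.7-py3-none-any.whl/forbidden/forbidden.py | get_method_override_urls
-- ===== SOURCE A (Python) =====
-- def unique(sequence):
-- 	seen = set()
-- 	return [x for x in sequence if not (x in seen or seen.add(x))]
--
-- def get_method_override_urls(url, methods):
-- 	tmp = []
-- 	parameters = [
-- 		"x-http-method-override",
-- 		"x-method-override"
-- 	]
-- 	separator = "&" if "?" in url else "?"
-- 	for parameter in parameters:
-- 		for method in methods:
-- 			tmp.append(("{0}{1}{2}={3}").format(url, separator, parameter, method))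
-- 	return unique(tmp)
-- ===== SOURCE B (Python) =====
-- def get_method_override_urls(url, methods):
-- 	separator = "&" if "?" in url else "?"
-- 	distinct = list(dict.fromkeys(methods))
-- 	return [
-- 		"{0}{1}{2}={3}".format(url, separator, parameter, method)
-- 		for parameter in ("x-http-method-override", "x-method-override")
-- 		for method in distinct
-- 	]
-- ===== Notes on version B (the rewrite author's own statement) =====
-- stated objective: simpler
-- what changed: B deduplicates the methods list up front (dict.fromkeys) and emits each URL once via a single flat comprehension over the two fixed parameters, instead of A's building all |params|*|methods| URLs and deduplicating the built list with a trailing seen-set unique() pass.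
import Mathlib
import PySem

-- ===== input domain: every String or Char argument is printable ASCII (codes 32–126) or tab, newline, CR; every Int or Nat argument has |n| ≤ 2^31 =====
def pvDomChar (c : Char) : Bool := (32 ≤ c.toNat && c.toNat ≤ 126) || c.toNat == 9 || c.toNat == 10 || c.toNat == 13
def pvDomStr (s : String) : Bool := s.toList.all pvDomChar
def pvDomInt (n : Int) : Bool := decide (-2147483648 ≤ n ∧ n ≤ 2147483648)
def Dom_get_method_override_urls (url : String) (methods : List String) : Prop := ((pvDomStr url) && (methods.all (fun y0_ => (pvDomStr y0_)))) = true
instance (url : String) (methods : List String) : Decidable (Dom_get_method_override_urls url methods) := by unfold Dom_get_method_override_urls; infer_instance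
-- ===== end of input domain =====

-- B deduplicates the methods up front and emits each URL exactly once with a flat
-- comprehension, removing A's post-hoc unique() pass over the built list (objective: simpler).

-- ===== PORT A =====
-- helper 'unique' of A: seen-set comprehension keeping first occurrences
def pyUnique (sequence : List String) : List String :=
  (sequence.foldl
    (fun (st : PySem.Set String × List String) x =>
      if PySem.Set.contains st.1 x then st else (PySem.Set.add st.1 x, st.2 ++ [x]))
    (PySem.Set.empty, [])).2

def get_method_override_urls (url : String) (methods : List String) : List String :=
  let parameters := ["x-http-method-override", "x-method-override"]
  let separator := if PySem.Str.isIn "?" url then "&" else "?"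
  let tmp := parameters.foldl (fun acc parameter =>
      methods.foldl (fun acc method =>
        acc ++ [url ++ separator ++ parameter ++ "=" ++ method]) acc) []
  pyUnique tmp

-- ===== PORT B =====
def get_method_override_urls_alt (url : String) (methods : List String) : List String :=
  let separator := if PySem.Str.isIn "?" url then "&" else "?"
  let distinct := PySem.List.dedup methods
  ["x-http-method-override", "x-method-override"].flatMap
    (fun parameter => distinct.map (fun method =>
      url ++ separator ++ parameter ++ "=" ++ method))

-- ===== PRECONDITION & SPEC =====
def Spec_get_method_override_urls (url : String) (methods : List String) (out : List String) : Prop := out = get_method_override_urls_alt url methods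
instance (url : String) (methods : List String) (out : List String) : Decidable (Spec_get_method_override_urls url methods out) := by unfold Spec_get_method_override_urls; infer_instance

-- ===== CLAIM (what is proved, stated in full; the proofs are below) =====
def Claim_equal_get_method_override_urls : Prop := ∀ (url : String) (methods : List String), Dom_get_method_override_urls url methods → Spec_get_method_override_urls url methods (get_method_override_urls url methods)

-- ===== LEMMAS AND PROOFS =====

-- A's unique-loop state: the seen set and the output list stay equal, and the loop is Set.update
theorem pyUnique_loop (xs : List String) (s : PySem.Set String) :
    xs.foldl
      (fun (st : PySem.Set String × List String) x =>
        if PySem.Set.contains st.1 x then st else (PySem.Set.add st.1 x, st.2 ++ [x]))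
      (s, (s : List String))
    = (PySem.Set.update s xs, PySem.Set.update s xs) := by
  induction xs generalizing s with
  | nil => simp [PySem.Set.update]
  | cons x xs ih =>
    by_cases h : PySem.Set.contains s x = true
    · have hm : x ∈ s := (PySem.Set.contains_iff s x).mp h
      have ha : PySem.Set.add s x = s := by simp [PySem.Set.add, hm]
      simp only [List.foldl_cons, PySem.Set.update, if_pos h, ha] at *
      exact ih s
    · have hm : x ∉ s := fun hx => h ((PySem.Set.contains_iff s x).mpr hx)
      have ha : PySem.Set.add s x = s ++ [x] := by simp [PySem.Set.add, hm]
      simp only [List.foldl_cons, PySem.Set.update, if_neg h, ha] at *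
      exact ih (s ++ [x])

theorem pyUnique_eq (xs : List String) : pyUnique xs = PySem.Set.ofList xs := by
  unfold pyUnique
  rw [show (PySem.Set.empty : PySem.Set String) = (([] : List String) : PySem.Set String) from rfl,
      pyUnique_loop xs []]
  simp [PySem.Set.update_nil_left]

-- building a set of images of an injective function commutes with map
theorem ofList_map_inj (f : String → String) (hf : Function.Injective f)
    (M : List String) (s : List String) :
    (M.map f).foldl PySem.Set.add (s.map f) = (M.foldl PySem.Set.add s).map f := by
  induction M generalizing s with
  | nil => simp
  | cons x xs ih =>
    have hmem : f x ∈ s.map f ↔ x ∈ s := by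
      constructor
      · intro hx
        obtain ⟨a, ha, he⟩ := List.mem_map.mp hx
        exact hf he ▸ ha
      · intro hx; exact List.mem_map.mpr ⟨x, hx, rfl⟩
    have hc : PySem.Set.add (s.map f) (f x) = (PySem.Set.add s x).map f := by
      by_cases h : x ∈ s
      · simp [PySem.Set.add, h, hmem.mpr h]
      · simp [PySem.Set.add, h]
        exact fun a ha he => h (by rw [← hf he]; exact ha)
    simp only [List.map_cons, List.foldl_cons, hc]
    exact ih (PySem.Set.add s x)

theorem ofList_map (f : String → String) (hf : Function.Injective f) (M : List String) :
    PySem.Set.ofList (M.map f) = (PySem.Set.ofList M).map f := by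
  have := ofList_map_inj f hf M []
  simpa [PySem.Set.ofList_eq_foldl] using this

-- appending the method is injective for a fixed prefix
theorem fmt_inj (u p : String) : Function.Injective (fun m => u ++ p ++ "=" ++ m) := by
  intro m1 m2 h
  simp only at h
  have h2 := congrArg String.toList h
  simp [String.toList_append] at h2
  exact String.toList_inj.mp h2

-- URLs built for the two distinct parameter names never coincide
theorem fmt_cross (u m1 m2 : String)
    (h : u ++ "x-http-method-override" ++ "=" ++ m1
       = u ++ "x-method-override" ++ "=" ++ m2) : False := by
  have h2 := congrArg String.toList h
  simp [String.toList_append, List.append_assoc] at h2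

theorem main_eq (url sep : String) (methods : List String) :
    pyUnique (["x-http-method-override", "x-method-override"].foldl
      (fun acc parameter => methods.foldl
        (fun acc method => acc ++ [url ++ sep ++ parameter ++ "=" ++ method]) acc) [])
  = ["x-http-method-override", "x-method-override"].flatMap
      (fun parameter => (PySem.List.dedup methods).map
        (fun method => url ++ sep ++ parameter ++ "=" ++ method)) := by
  simp only [List.foldl_cons, List.foldl_nil,
    PySem.List.foldl_append_singleton_eq_map, List.nil_append]
  rw [pyUnique_eq]
  have hof : ∀ p : String,
      PySem.Set.ofList (methods.map (fun m => url ++ sep ++ p ++ "=" ++ m))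
      = (PySem.Set.ofList methods).map (fun m => url ++ sep ++ p ++ "=" ++ m) :=
    fun p => ofList_map _ (fmt_inj (url ++ sep) p) methods
  have hsplit : PySem.Set.ofList
      (methods.map (fun m => url ++ sep ++ "x-http-method-override" ++ "=" ++ m)
        ++ methods.map (fun m => url ++ sep ++ "x-method-override" ++ "=" ++ m))
    = PySem.Set.update
        (PySem.Set.ofList (methods.map (fun m => url ++ sep ++ "x-http-method-override" ++ "=" ++ m)))
        (methods.map (fun m => url ++ sep ++ "x-method-override" ++ "=" ++ m)) := by
    simp [PySem.Set.ofList_eq_foldl, PySem.Set.update, List.foldl_append]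
  rw [hsplit, PySem.Set.update_eq_append_filter, hof, hof]
  have hfil : (((PySem.Set.ofList methods).map (fun m => url ++ sep ++ "x-method-override" ++ "=" ++ m)).filter
      (fun y => !(PySem.Set.contains ((PySem.Set.ofList methods).map (fun m => url ++ sep ++ "x-http-method-override" ++ "=" ++ m)) y)))
      = (PySem.Set.ofList methods).map (fun m => url ++ sep ++ "x-method-override" ++ "=" ++ m) := by
    apply List.filter_eq_self.mpr
    intro y hy
    obtain ⟨m2, _, rfl⟩ := List.mem_map.mp hy
    simp only [Bool.not_eq_true']
    rw [← Bool.not_eq_true]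
    intro hcon
    obtain ⟨m1, _, he⟩ := List.mem_map.mp ((PySem.Set.contains_iff _ _).mp hcon)
    exact fmt_cross (url ++ sep) m1 m2 he
  rw [hfil]
  simp [List.flatMap]

-- ===== VERDICT (by name: the statement is the Claim_ definition above) =====
theorem get_method_override_urls_spec : Claim_equal_get_method_override_urls := by
  intro url methods _
  unfold Spec_get_method_override_urls get_method_override_urls get_method_override_urls_alt
  exact main_eq url (if PySem.Str.isIn "?" url then "&" else "?") methods
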